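-- pv_equiv track=rewrite | github.com/devilfrute/Seqlyzer | Testcode.py | detect_exons
-- ===== SOURCE A (Python) =====
-- def detect_exons(sequence):
--     exons = []
--     # Example: detecting a simple pattern of 'ATG' followed by stop codons
--     for i in range(0, len(sequence)-2):
--         if sequence[i:i+3] == "ATG":
--             exon_start = i
--             for j in range(i+3, len(sequence)-2, 3):
--                 codon = sequence[j:j+3]
--                 if codon in ["TAA", "TAG", "TGA"]:
--                     exon_end = j + 3
--                     exons.append((exon_start, exon_end))
--                     break
--     return exons
-- ===== SOURCE B (Python) =====
-- def detect_exons(sequence):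
--     # One right-to-left pass precomputes, for every position j, the nearest
--     # in-frame stop codon at or after j; each ATG then reads one table entry.
--     n = len(sequence)
--     stops = ("TAA", "TAG", "TGA")
--     nxt = [-1] * n
--     for j in range(n - 3, -1, -1):
--         if sequence[j:j+3] in stops:
--             nxt[j] = j
--         elif j + 3 < n:
--             nxt[j] = nxt[j + 3]
--     exons = []
--     for i in range(0, n - 2):
--         if sequence[i:i+3] == "ATG" and i + 3 < n and nxt[i + 3] != -1:
--             exons.append((i, nxt[i + 3] + 3))
--     return exons
-- ===== Notes on version B (the rewrite author's own statement) =====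
-- stated objective: alternative
-- what changed: Instead of rescanning forward from every ATG for its stop codon (quadratic when ATGs are dense), B does one right-to-left pass that precomputes the nearest in-frame stop codon at or after each position and then reads one table entry per ATG.
import Mathlib
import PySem

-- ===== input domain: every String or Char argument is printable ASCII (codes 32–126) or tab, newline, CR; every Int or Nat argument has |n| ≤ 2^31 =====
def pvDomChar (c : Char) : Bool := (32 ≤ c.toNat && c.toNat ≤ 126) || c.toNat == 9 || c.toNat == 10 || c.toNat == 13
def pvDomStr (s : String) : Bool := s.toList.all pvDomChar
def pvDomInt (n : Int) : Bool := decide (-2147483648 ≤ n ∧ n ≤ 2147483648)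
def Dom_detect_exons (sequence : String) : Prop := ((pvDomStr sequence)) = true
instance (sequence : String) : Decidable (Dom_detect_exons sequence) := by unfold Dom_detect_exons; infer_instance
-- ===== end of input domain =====

-- B replaces A's per-ATG forward rescan for an in-frame stop codon by a single right-to-left
-- pass that precomputes the nearest in-frame stop at or after each position (alternative algorithm).

-- ===== PORT A =====
-- A's inner 'for j in range(i+3, len(sequence)-2, 3): … break' loop: first in-frame stop position
def pvInnerA (cs : List Char) (js : List Int) : Option Int :=
  match js with
  | [] => none
  | j :: rest =>
    if ["TAA".toList, "TAG".toList, "TGA".toList].contains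
        (PySem.List.slice cs (some j) (some (j + 3)))
    then some j
    else pvInnerA cs rest

def detect_exons (sequence : String) : List (Int × Int) :=
  let cs := sequence.toList
  let n : Int := cs.length
  (PySem.List.pyRange 0 (n - 2) 1).foldl (fun exons i =>
    if PySem.List.slice cs (some i) (some (i + 3)) = "ATG".toList then
      match pvInnerA cs (PySem.List.pyRange (i + 3) (n - 2) 3) with
      | some j => exons ++ [(i, j + 3)]
      | none => exons
    else exons) []

-- ===== PORT B =====
def detect_exons_alt (sequence : String) : List (Int × Int) :=
  let cs := sequence.toList
  let n : Int := cs.length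
  let nxt := (PySem.List.pyRange (n - 3) (-1) (-1)).foldl (fun nxt j =>
    if ["TAA".toList, "TAG".toList, "TGA".toList].contains
        (PySem.List.slice cs (some j) (some (j + 3))) then
      PySem.List.pySetD nxt j j
    else if j + 3 < n then
      PySem.List.pySetD nxt j (PySem.List.pyGetD nxt (j + 3) (-1))
    else nxt) (PySem.List.pyRepeat [-1] n)
  (PySem.List.pyRange 0 (n - 2) 1).foldl (fun exons i =>
    if PySem.List.slice cs (some i) (some (i + 3)) = "ATG".toList ∧
       i + 3 < n ∧ PySem.List.pyGetD nxt (i + 3) (-1) ≠ -1 then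
      exons ++ [(i, PySem.List.pyGetD nxt (i + 3) (-1) + 3)]
    else exons) []

-- ===== PRECONDITION & SPEC =====
def Spec_detect_exons (sequence : String) (out : List (Int × Int)) : Prop := out = detect_exons_alt sequence
instance (sequence : String) (out : List (Int × Int)) : Decidable (Spec_detect_exons sequence out) := by unfold Spec_detect_exons; infer_instance

-- ===== CLAIM (what is proved, stated in full; the proofs are below) =====
def Claim_equal_detect_exons : Prop := ∀ (sequence : String), Dom_detect_exons sequence → Spec_detect_exons sequence (detect_exons sequence)

-- ===== LEMMAS AND PROOFS =====

-- the value A's inner scan starting at position t yields, -1 encoding "no stop found"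
def pvG (cs : List Char) (n t : Int) : Int :=
  (pvInnerA cs (PySem.List.pyRange t (n - 2) 3)).getD (-1)

-- pyRange nil/cons unfolding for a positive step
lemma pvRange_pos_nil (a b s : Int) (hs : 0 < s) (h : b ≤ a) :
    PySem.List.pyRange a b s = [] := by
  rw [PySem.List.pyRange_of_pos a b hs]
  simp [not_lt.mpr h]

lemma pvRange_pos_cons (a b s : Int) (hs : 0 < s) (h : a < b) :
    PySem.List.pyRange a b s = a :: PySem.List.pyRange (a + s) b s := by
  rw [PySem.List.pyRange_of_pos a b hs, PySem.List.pyRange_of_pos (a + s) b hs]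
  rw [if_pos h]
  have hd : (b - a + s - 1) / s = (b - a - 1) / s + 1 := by
    have : b - a + s - 1 = (b - a - 1) + 1 * s := by ring
    rw [this, Int.add_mul_ediv_right _ _ (by omega)]
  have hnn : 0 ≤ (b - a - 1) / s := Int.ediv_nonneg (by omega) (by omega)
  by_cases h2 : a + s < b
  · rw [if_pos h2]
    have he : b - (a + s) + s - 1 = b - a - 1 := by ring
    rw [he]
    have : ((b - a + s - 1) / s).toNat = ((b - a - 1) / s).toNat + 1 := by omega
    rw [this, List.range_succ_eq_map]
    simp only [List.map_cons, List.map_map, Nat.cast_zero, mul_zero, add_zero]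
    congr 1
    refine List.map_congr_left ?_
    intro k _
    simp only [Function.comp_apply, Nat.succ_eq_add_one]
    push_cast
    ring
  · rw [if_neg h2]
    have hz : (b - a - 1) / s = 0 := Int.ediv_eq_zero_of_lt (by omega) (by omega)
    have : ((b - a + s - 1) / s).toNat = 1 := by omega
    rw [this]
    simp

-- pyRange nil/cons unfolding for the descending loop 'range(n-3, -1, -1)'
lemma pvRange_desc_nil (a : Int) (h : a < 0) :
    PySem.List.pyRange a (-1) (-1) = [] := by
  show (if (-1 : Int) = 0 then _ else _) = _
  rw [if_neg (by omega)]
  simp only [show ¬(0:Int) < -1 by omega, if_false]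
  rw [if_neg (by omega)]
  simp

lemma pvRange_desc_cons (a : Int) (h : 0 ≤ a) :
    PySem.List.pyRange a (-1) (-1) = a :: PySem.List.pyRange (a - 1) (-1) (-1) := by
  show (if (-1 : Int) = 0 then _ else _) = _
  rw [if_neg (by omega)]
  simp only [show ¬(0:Int) < -1 by omega, if_false]
  rw [if_pos (by omega : (-1:Int) < a)]
  show _ = a :: (if (-1 : Int) = 0 then _ else _)
  rw [if_neg (by omega)]
  simp only [show ¬(0:Int) < -1 by omega, if_false]
  have hc1 : ((a - -1 + - -1 - 1) / - -1).toNat = a.toNat + 1 := by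
    simp only [neg_neg, Int.ediv_one]; omega
  have hc2 : (if (-1:Int) < a - 1 then ((a - 1 - -1 + - -1 - 1) / - -1).toNat else 0) = a.toNat := by
    split_ifs with ha
    · simp only [neg_neg, Int.ediv_one]; omega
    · omega
  rw [hc1, hc2, List.range_succ_eq_map]
  simp only [List.map_cons, List.map_map, Nat.cast_zero, mul_zero, add_zero]
  congr 1
  refine List.map_congr_left ?_
  intro k _
  simp only [Function.comp_apply, Nat.succ_eq_add_one]
  push_cast
  ring

lemma pvInnerA_mem (cs : List Char) (js : List Int) (j : Int)
    (h : pvInnerA cs js = some j) : j ∈ js := by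
  induction js with
  | nil => simp [pvInnerA] at h
  | cons a rest ih =>
    rw [pvInnerA] at h
    split at h
    · simp at h; simp [h]
    · exact List.mem_cons_of_mem _ (ih h)

lemma pvG_of_ge (cs : List Char) (n t : Int) (h : n - 2 ≤ t) : pvG cs n t = -1 := by
  rw [pvG, pvRange_pos_nil t (n - 2) 3 (by omega) h]
  rfl

lemma pvG_step (cs : List Char) (n t : Int) (h : t < n - 2) :
    pvG cs n t =
      (if ["TAA".toList, "TAG".toList, "TGA".toList].contains
          (PySem.List.slice cs (some t) (some (t + 3)))
       then t else pvG cs n (t + 3)) := by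
  rw [pvG, pvRange_pos_cons t (n - 2) 3 (by omega) h, pvInnerA]
  split
  · rfl
  · rfl

-- B's descending fold computes pvG at every position of the array
lemma pvNxt_inv (cs : List Char) (n : Int) (hn : n = cs.length) :
    ∀ (m : Nat) (j0 : Int), j0 + 1 = (m : Int) → j0 ≤ n - 3 →
    ∀ arr : List Int, arr.length = n.toNat →
    (∀ t : Int, j0 < t → t < n → PySem.List.pyGetD arr t (-1) = pvG cs n t) →
    (∀ t : Int, 0 ≤ t → t ≤ j0 → PySem.List.pyGetD arr t (-1) = -1) →
    ∀ t : Int, 0 ≤ t → t < n →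
      PySem.List.pyGetD
        ((PySem.List.pyRange j0 (-1) (-1)).foldl (fun nxt j =>
          if ["TAA".toList, "TAG".toList, "TGA".toList].contains
              (PySem.List.slice cs (some j) (some (j + 3))) then
            PySem.List.pySetD nxt j j
          else if j + 3 < n then
            PySem.List.pySetD nxt j (PySem.List.pyGetD nxt (j + 3) (-1))
          else nxt) arr) t (-1) = pvG cs n t := by
  intro m
  induction m with
  | zero =>
    intro j0 hj0 _ arr _ h1 _ t ht0 htn
    rw [pvRange_desc_nil j0 (by omega)]
    exact h1 t (by omega) htn
  | succ m ih =>
    intro j0 hj0 hj3 arr hlen h1 h2 t ht0 htn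
    have hj00 : 0 ≤ j0 := by omega
    rw [pvRange_desc_cons j0 hj00, List.foldl_cons]
    have hjlt : j0.toNat < arr.length := by omega
    have hjc : (j0.toNat : Int) = j0 := Int.toNat_of_nonneg hj00
    have hget : ∀ (v : Int) (u : Int), 0 ≤ u → u < n →
        PySem.List.pyGetD (PySem.List.pySetD arr j0 v) u (-1) =
          if u = j0 then v else PySem.List.pyGetD arr u (-1) := by
      intro v u hu0 hun
      have huc : (u.toNat : Int) = u := Int.toNat_of_nonneg hu0
      rw [← hjc, ← huc, PySem.List.pyGetD_pySetD_natCast arr j0.toNat u.toNat v (-1) hjlt]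
      by_cases he : u = j0
      · rw [if_pos (by omega), if_pos (by rw [huc, hjc, he])]
      · rw [if_neg (by omega), if_neg (by rw [huc, hjc]; exact he)]
    apply ih (j0 - 1) (by omega) (by omega)
    · split_ifs <;> simp [PySem.List.length_pySetD, hlen]
    · intro u hu hun
      have hu0 : 0 ≤ u := by omega
      by_cases heq : u = j0
      · subst heq
        split_ifs with hstop hlt3
        · rw [hget u u hu0 hun, if_pos rfl, pvG_step cs n u (by omega), if_pos hstop]
        · rw [hget _ u hu0 hun, if_pos rfl, pvG_step cs n u (by omega), if_neg hstop]
          exact h1 (u + 3) (by omega) (by omega)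
        · rw [h2 u hu0 (le_refl u), pvG_step cs n u (by omega), if_neg hstop,
            pvG_of_ge cs n (u + 3) (by omega)]
      · have hgt : j0 < u := by omega
        split_ifs with hstop hlt3
        · rw [hget j0 u hu0 hun, if_neg heq]; exact h1 u hgt hun
        · rw [hget _ u hu0 hun, if_neg heq]; exact h1 u hgt hun
        · exact h1 u hgt hun
    · intro u hu0 hu
      have hun : u < n := by omega
      split_ifs with hstop hlt3
      · rw [hget j0 u hu0 hun, if_neg (by omega)]; exact h2 u hu0 (by omega)
      · rw [hget _ u hu0 hun, if_neg (by omega)]; exact h2 u hu0 (by omega)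
      · exact h2 u hu0 (by omega)
    · exact ht0
    · exact htn

-- ===== VERDICT (by name: the statement is the Claim_ definition above) =====
theorem detect_exons_spec : Claim_equal_detect_exons := by
  intro sequence _hdom
  unfold Spec_detect_exons detect_exons detect_exons_alt
  simp only []
  set cs := sequence.toList with hcs
  set n : Int := (cs.length : Int) with hn
  by_cases hsmall : n - 2 ≤ 0
  · rw [pvRange_pos_nil 0 (n - 2) 1 (by omega) hsmall]
    rfl
  · -- n ≥ 3
    have hn3 : 3 ≤ n := by omega
    have Hnxt : ∀ t : Int, 0 ≤ t → t < n →
        PySem.List.pyGetD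
          ((PySem.List.pyRange (n - 3) (-1) (-1)).foldl (fun nxt j =>
            if ["TAA".toList, "TAG".toList, "TGA".toList].contains
                (PySem.List.slice cs (some j) (some (j + 3))) then
              PySem.List.pySetD nxt j j
            else if j + 3 < n then
              PySem.List.pySetD nxt j (PySem.List.pyGetD nxt (j + 3) (-1))
            else nxt) (PySem.List.pyRepeat [-1] n)) t (-1) = pvG cs n t := by
      apply pvNxt_inv cs n rfl (n - 2).toNat (n - 3) (by omega) (by omega)
      · rw [PySem.List.pyRepeat_singleton, List.length_replicate]
      · intro t ht htn
        rw [PySem.List.pyRepeat_singleton,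
          PySem.List.pyGetD_eq_getElem _ _ (by omega) (by simp; omega),
          List.getElem_replicate, pvG_of_ge cs n t (by omega)]
      · intro t ht0 ht
        rw [PySem.List.pyRepeat_singleton,
          PySem.List.pyGetD_eq_getElem _ _ ht0 (by simp; omega),
          List.getElem_replicate]
    apply PySem.List.foldl_congr_mem
    intro acc i hi
    rw [PySem.List.mem_pyRange_one] at hi
    by_cases hatg : PySem.List.slice cs (some i) (some (i + 3)) = "ATG".toList
    · by_cases hin : i + 3 < n
      · have hG := Hnxt (i + 3) (by omega) hin
        cases hcase : pvInnerA cs (PySem.List.pyRange (i + 3) (n - 2) 3) with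
        | none =>
          have hGv : pvG cs n (i + 3) = -1 := by rw [pvG, hcase]; rfl
          rw [if_pos hatg, hG, hGv]
          simp
        | some j =>
          have hjmem := pvInnerA_mem cs _ j hcase
          rw [PySem.List.mem_pyRange_iff_of_pos (by omega)] at hjmem
          have hGv : pvG cs n (i + 3) = j := by rw [pvG, hcase]; rfl
          rw [if_pos hatg, hG, hGv, if_pos ⟨hatg, hin, by omega⟩]
      · rw [if_pos hatg, pvRange_pos_nil (i + 3) (n - 2) 3 (by omega) (by omega)]
        rw [show pvInnerA cs [] = none from rfl, if_neg (by tauto)]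
    · rw [if_neg hatg, if_neg (by tauto)]
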